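-- pv_equiv track=rewrite | github.com/Lala-pukuchan/ready-set-boole | ex09/set_eval.py | eval_set
-- ===== SOURCE A (Python) =====
-- from typing import List, Set
--
-- def eval_set(formula: str, sets: List[Set[int]]) -> Set[int]:
--     """
--     Evaluate the formula in RPN with the given list of sets.
--     """
--     stack = []
--     encompassing_set = set.union(*sets) if sets else set()
--
--     for symbol in formula:
--         if "A" <= symbol <= "Z":  # Variables A-Z map to sets
--             # [A, B, C, ...] -> [0, 1, 2, ...]
--             index = ord(symbol) - ord("A")
--             if index < len(sets):
--                 stack.append(sets[index])
--             else:
--                 raise ValueError(f"Set for variable '{symbol}' not provided.")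
--         elif symbol == "!":  # Complement
--             if not stack:
--                 raise ValueError("Invalid formula: missing operand for '!'")
--             set_to_complement = stack.pop()
--             stack.append(encompassing_set - set_to_complement)
--         elif symbol == "&":  # Intersection
--             if len(stack) < 2:
--                 raise ValueError("Invalid formula: missing operands for '&'")
--             b = stack.pop()
--             a = stack.pop()
--             stack.append(a & b)
--         elif symbol == "|":  # Union
--             if len(stack) < 2:
--                 raise ValueError("Invalid formula: missing operands for '|'")
--             b = stack.pop()
--             a = stack.pop()
--             stack.append(a | b)
--         else:
--             raise ValueError(f"Invalid symbol '{symbol}' in formula.")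
--
--     if len(stack) != 1:
--         raise ValueError("Invalid formula: too many operands.")
--     result = stack.pop()
--     return list(result) if result else []
-- ===== SOURCE B (Python) =====
-- def eval_set(formula, sets):
--     # Pass 1: parse the RPN formula into an explicit expression tree.
--     stack = []
--     for symbol in formula:
--         if "A" <= symbol <= "Z":
--             index = ord(symbol) - ord("A")
--             if index >= len(sets):
--                 raise ValueError(f"Set for variable '{symbol}' not provided.")
--             stack.append(("leaf", sets[index]))
--         elif symbol == "!":
--             if not stack:
--                 raise ValueError("Invalid formula: missing operand for '!'")
--             stack.append(("!", stack.pop()))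
--         elif symbol in "&|":
--             if len(stack) < 2:
--                 raise ValueError(f"Invalid formula: missing operands for '{symbol}'")
--             b = stack.pop()
--             a = stack.pop()
--             stack.append((symbol, a, b))
--         else:
--             raise ValueError(f"Invalid symbol '{symbol}' in formula.")
--     if len(stack) != 1:
--         raise ValueError("Invalid formula: too many operands.")
--     # Pass 2: evaluate the tree recursively.
--     universe = set.union(*sets) if sets else set()
--
--     def ev(node):
--         if node[0] == "leaf":
--             return set(node[1])
--         if node[0] == "!":
--             return universe - ev(node[1])
--         a, b = ev(node[1]), ev(node[2])
--         return a & b if node[0] == "&" else a | b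
--
--     return list(ev(stack[0]))
-- ===== Notes on version B (the rewrite author's own statement) =====
-- stated objective: alternative
-- what changed: B first parses the RPN formula into an explicit expression tree (separate syntax pass with plain arithmetic stack discipline) and then evaluates that tree recursively, instead of A's single pass that interleaves parsing with eager set computation on the stack.
import Mathlib
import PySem

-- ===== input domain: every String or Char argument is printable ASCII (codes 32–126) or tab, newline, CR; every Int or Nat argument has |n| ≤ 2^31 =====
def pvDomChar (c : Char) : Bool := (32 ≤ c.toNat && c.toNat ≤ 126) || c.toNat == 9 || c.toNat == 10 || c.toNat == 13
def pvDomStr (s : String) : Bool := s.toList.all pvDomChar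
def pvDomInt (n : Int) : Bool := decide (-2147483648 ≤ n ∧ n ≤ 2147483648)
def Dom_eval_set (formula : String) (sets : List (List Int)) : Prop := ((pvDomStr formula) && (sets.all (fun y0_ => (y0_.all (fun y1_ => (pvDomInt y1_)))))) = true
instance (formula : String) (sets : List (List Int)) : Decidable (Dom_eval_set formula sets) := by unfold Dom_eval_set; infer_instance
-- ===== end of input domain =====

-- B parses the formula into an explicit expression tree first and evaluates it recursively
-- afterwards; A computes sets eagerly while scanning. Equivalence on all inputs where A returns.

-- ===== PORT A =====
-- encompassing_set = set.union(*sets) if sets else set()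
def pvUniv (sets : List (List Int)) : PySem.Set Int :=
  sets.foldl (fun acc l => PySem.Set.union acc l) PySem.Set.empty

-- A's single pass: a stack of already-computed sets (head = top of the Python stack);
-- none = the corresponding ValueError.
def evalSetLoop (sets : List (List Int)) (univ : PySem.Set Int) :
    List Char → List (PySem.Set Int) → Option (List (PySem.Set Int))
  | [], stack => some stack
  | c :: rest, stack =>
    if 'A' ≤ c ∧ c ≤ 'Z' then
      match sets[(c.toNat - 65)]? with
      | some s => evalSetLoop sets univ rest (PySem.Set.ofList s :: stack)
      | none => none
    else if c = '!' then
      match stack with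
      | s :: tl => evalSetLoop sets univ rest (PySem.Set.diff univ s :: tl)
      | [] => none
    else if c = '&' then
      match stack with
      | b :: a :: tl => evalSetLoop sets univ rest (PySem.Set.inter a b :: tl)
      | _ => none
    else if c = '|' then
      match stack with
      | b :: a :: tl => evalSetLoop sets univ rest (PySem.Set.union a b :: tl)
      | _ => none
    else none

def eval_set (formula : String) (sets : List (List Int)) : List Int :=
  match evalSetLoop sets (pvUniv sets) formula.toList [] with
  | some [s] => s
  | _ => []

-- ===== PORT B =====
-- B's expression tree.
inductive SetExpr : Type
  | leaf : List Int → SetExpr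
  | compl : SetExpr → SetExpr
  | inter : SetExpr → SetExpr → SetExpr
  | union : SetExpr → SetExpr → SetExpr

-- B's pass 1: one parse step per symbol (Source B's for-loop body); the node stack is
-- threaded through a foldl, none = ValueError already raised.
def parseStep (sets : List (List Int)) (st? : Option (List SetExpr)) (c : Char) :
    Option (List SetExpr) :=
  match st? with
  | none => none
  | some stack =>
    if 'A' ≤ c ∧ c ≤ 'Z' then
      match sets[(c.toNat - 65)]? with
      | none => none
      | some s => some (SetExpr.leaf s :: stack)
    else if c = '!' then
      match stack with
      | [] => none
      | e :: tl => some (SetExpr.compl e :: tl)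
    else if c = '&' then
      match stack with
      | [] => none
      | [_] => none
      | b :: a :: tl => some (SetExpr.inter a b :: tl)
    else if c = '|' then
      match stack with
      | [] => none
      | [_] => none
      | b :: a :: tl => some (SetExpr.union a b :: tl)
    else none

-- universe = set.union(*sets) if sets else set()   (Source B's own copy of the line)
def pvUnivB (sets : List (List Int)) : PySem.Set Int :=
  sets.foldl (fun acc l => PySem.Set.union acc l) PySem.Set.empty

-- B's pass 2: recursive evaluation of the tree.
def pvEvalExpr (univ : PySem.Set Int) : SetExpr → PySem.Set Int
  | .leaf l => PySem.Set.ofList l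
  | .compl e => PySem.Set.diff univ (pvEvalExpr univ e)
  | .inter a b => PySem.Set.inter (pvEvalExpr univ a) (pvEvalExpr univ b)
  | .union a b => PySem.Set.union (pvEvalExpr univ a) (pvEvalExpr univ b)

def eval_set_alt (formula : String) (sets : List (List Int)) : List Int :=
  match formula.toList.foldl (parseStep sets) (some []) with
  | none => []
  | some st =>
    match st with
    | [] => []
    | e :: [] => pvEvalExpr (pvUnivB sets) e
    | _ :: _ :: _ => []

-- ===== PRECONDITION & SPEC =====
-- Counting check of RPN well-formedness: exactly the inputs on which Python A returns
-- (every symbol legal, every variable provided, operands available, one value left).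
def pvOk (sets : List (List Int)) : List Char → Int → Bool
  | [], n => n == 1
  | c :: rest, n =>
    if 'A' ≤ c ∧ c ≤ 'Z' then
      decide (c.toNat - 65 < sets.length) && pvOk sets rest (n + 1)
    else if c = '!' then decide (1 ≤ n) && pvOk sets rest n
    else if c = '&' ∨ c = '|' then decide (2 ≤ n) && pvOk sets rest (n - 1)
    else false

def Pre_eval_set (formula : String) (sets : List (List Int)) : Prop :=
  pvOk sets formula.toList 0 = true
instance (formula : String) (sets : List (List Int)) : Decidable (Pre_eval_set formula sets) := by unfold Pre_eval_set; infer_instance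

def pvWitness_eval_set : String × List (List Int) := ("AB&A!|", [[1, 2], [2, 3]])

def Spec_eval_set (formula : String) (sets : List (List Int)) (out : List Int) : Prop := out = eval_set_alt formula sets
instance (formula : String) (sets : List (List Int)) (out : List Int) : Decidable (Spec_eval_set formula sets out) := by unfold Spec_eval_set; infer_instance

-- ===== CLAIM (what is proved, stated in full; the proofs are below) =====
def Claim_equal_eval_set : Prop := ∀ (formula : String) (sets : List (List Int)), Dom_eval_set formula sets → Pre_eval_set formula sets → Spec_eval_set formula sets (eval_set formula sets)

-- ===== LEMMAS AND PROOFS =====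

-- A failed parse stays failed for the rest of the scan.
lemma foldl_parseStep_none (sets : List (List Int)) :
    ∀ cs : List Char, cs.foldl (parseStep sets) none = none := by
  intro cs
  induction cs with
  | nil => rfl
  | cons c rest ih => simpa [List.foldl, parseStep] using ih

-- Invariant: A's eager stack is the image under evaluation of B's node stack.
lemma evalSetLoop_eq_parse (sets : List (List Int)) (univ : PySem.Set Int) :
    ∀ (cs : List Char) (st : List SetExpr),
      evalSetLoop sets univ cs (st.map (pvEvalExpr univ)) =
        Option.map (fun l => l.map (pvEvalExpr univ)) (cs.foldl (parseStep sets) (some st)) := by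
  intro cs
  induction cs with
  | nil => intro st; simp [evalSetLoop]
  | cons c rest ih =>
    intro st
    by_cases hAZ : 'A' ≤ c ∧ c ≤ 'Z'
    · simp only [evalSetLoop, List.foldl, parseStep, if_pos hAZ]
      cases sets[(c.toNat - 65)]? with
      | none => simp [foldl_parseStep_none]
      | some s => exact ih (SetExpr.leaf s :: st)
    · by_cases hn : c = '!'
      · simp only [evalSetLoop, List.foldl, parseStep, if_neg hAZ, if_pos hn]
        cases st with
        | nil => simp [foldl_parseStep_none]
        | cons e tl => exact ih (SetExpr.compl e :: tl)
      · by_cases ha : c = '&'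
        · simp only [evalSetLoop, List.foldl, parseStep, if_neg hAZ, if_neg hn, if_pos ha]
          cases st with
          | nil => simp [foldl_parseStep_none]
          | cons b tl =>
            cases tl with
            | nil => simp [foldl_parseStep_none]
            | cons a tl' => exact ih (SetExpr.inter a b :: tl')
        · by_cases ho : c = '|'
          · simp only [evalSetLoop, List.foldl, parseStep, if_neg hAZ, if_neg hn, if_neg ha, if_pos ho]
            cases st with
            | nil => simp [foldl_parseStep_none]
            | cons b tl =>
              cases tl with
              | nil => simp [foldl_parseStep_none]
              | cons a tl' => exact ih (SetExpr.union a b :: tl')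
          · simp [evalSetLoop, List.foldl, parseStep, hAZ, hn, ha, ho, foldl_parseStep_none]

-- ===== VERDICT (by name: the statement is the Claim_ definition above) =====
theorem eval_set_spec : Claim_equal_eval_set := by
  intro formula sets _ _
  unfold Spec_eval_set eval_set eval_set_alt
  have hu : pvUniv sets = pvUnivB sets := rfl
  rw [hu]
  have h := evalSetLoop_eq_parse sets (pvUnivB sets) formula.toList []
  simp only [List.map_nil] at h
  rw [h]
  cases hp : formula.toList.foldl (parseStep sets) (some []) with
  | none => rfl
  | some l =>
    cases l with
    | nil => rfl
    | cons e tl =>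
      cases tl with
      | nil => rfl
      | cons e' tl' => rfl
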